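-- pv_equiv track=rewrite | github.com/Cat-Not-Furry/API-OCR | ocr/association.py | agrupar_checkboxes_ordenados
-- ===== SOURCE A (Python) =====
-- from typing import List, Dict, Any, Optional
--
-- def agrupar_checkboxes_ordenados(
--     checkboxes: List[Dict], umbral_vertical: int = 50
-- ) -> List[List[Dict]]:
--     """
--     Agrupa checkboxes por proximidad vertical, respetando el orden de lectura.
--     Útil para detectar grupos de opciones (radio buttons) donde solo una debería estar marcada.
--
--     Args:
--         checkboxes: Lista de diccionarios, cada uno debe tener clave 'bbox' [x, y, w, h].
--         umbral_vertical: Distancia máxima en Y para considerar que están en el mismo grupo.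
--
--     Returns:
--         Lista de grupos, cada grupo es una lista de checkboxes.
--     """
--     # Ordenar por Y (fila) y luego por X (columna)
--     ordenados = sorted(checkboxes, key=lambda cb: (cb["bbox"][1], cb["bbox"][0]))
--     grupos = []
--     grupo_actual = []
--
--     for cb in ordenados:
--         if not grupo_actual:
--             grupo_actual = [cb]
--             continue
--         ultimo = grupo_actual[-1]
--         dist_y = abs(cb["bbox"][1] - ultimo["bbox"][1])
--         if dist_y < umbral_vertical:
--             grupo_actual.append(cb)
--         else:
--             grupos.append(grupo_actual)
--             grupo_actual = [cb]
--     if grupo_actual: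
--         grupos.append(grupo_actual)
--
--     return grupos
-- ===== SOURCE B (Python) =====
-- def agrupar_checkboxes_ordenados(checkboxes, umbral_vertical=50):
--     """Staged: sort, collect boundary indices from consecutive pairs, then slice."""
--     ordenados = sorted(checkboxes, key=lambda cb: (cb["bbox"][1], cb["bbox"][0]))
--     n = len(ordenados)
--     limites = [i for i in range(n)
--                if i == 0
--                or abs(ordenados[i]["bbox"][1] - ordenados[i - 1]["bbox"][1]) >= umbral_vertical]
--     return [ordenados[a:b] for a, b in zip(limites, limites[1:] + [n])]
-- ===== Notes on version B (the rewrite author's own statement) =====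
-- stated objective: alternative
-- what changed: A builds the groups in one accumulator loop (current group flushed into the result); B instead makes two staged passes: it first collects the boundary indices (0 plus every i where the y-gap to the previous sorted element reaches the threshold) with a range comprehension, then reconstructs each group by slicing the sorted list between consecutive boundaries.
import Mathlib
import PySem

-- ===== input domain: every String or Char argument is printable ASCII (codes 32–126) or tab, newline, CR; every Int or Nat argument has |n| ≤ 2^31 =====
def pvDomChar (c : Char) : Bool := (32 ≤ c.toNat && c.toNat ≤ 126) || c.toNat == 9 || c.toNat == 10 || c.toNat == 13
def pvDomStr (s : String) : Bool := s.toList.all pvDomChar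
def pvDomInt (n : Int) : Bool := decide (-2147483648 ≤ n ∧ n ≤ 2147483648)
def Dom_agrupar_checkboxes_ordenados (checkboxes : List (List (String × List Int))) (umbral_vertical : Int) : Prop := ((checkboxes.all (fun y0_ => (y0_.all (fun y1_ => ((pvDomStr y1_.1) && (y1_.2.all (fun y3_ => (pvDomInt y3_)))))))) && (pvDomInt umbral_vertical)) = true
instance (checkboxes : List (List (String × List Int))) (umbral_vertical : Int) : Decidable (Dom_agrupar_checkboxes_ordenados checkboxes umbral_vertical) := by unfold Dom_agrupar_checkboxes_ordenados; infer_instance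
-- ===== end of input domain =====

-- B replaces A's accumulator loop by two staged passes: collect the boundary indices, then slice; return values proved equal.

-- shared accessor: cb["bbox"][1] / cb["bbox"][0] (default only reached outside Pre_)
def pvY (cb : List (String × List Int)) : Int :=
  (PySem.List.pyGet? ((PySem.Dict.get? (PySem.Dict.mk cb) "bbox").getD []) 1).getD 0
def pvX (cb : List (String × List Int)) : Int :=
  (PySem.List.pyGet? ((PySem.Dict.get? (PySem.Dict.mk cb) "bbox").getD []) 0).getD 0

-- ===== PORT A =====
-- loop body of A: state = (grupos, grupo_actual)
def pvStepA (u : Int) (s : List (List (List (String × List Int))) × List (List (String × List Int)))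
    (cb : List (String × List Int)) :
    List (List (List (String × List Int))) × List (List (String × List Int)) :=
  if s.2.isEmpty then (s.1, [cb])
  else
    let ultimo := (PySem.List.pyGet? s.2 (-1)).getD []   -- grupo_actual[-1]
    let dist_y := |pvY cb - pvY ultimo|
    if dist_y < u then (s.1, s.2 ++ [cb]) else (s.1 ++ [s.2], [cb])

def agrupar_checkboxes_ordenados (checkboxes : List (List (String × List Int))) (umbral_vertical : Int) : List (List (List (String × List Int))) :=
  let ordenados := PySem.List.sorted2 checkboxes (fun cb => pvY cb) (fun cb => pvX cb)
  let st := ordenados.foldl (pvStepA umbral_vertical) ([], [])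
  if st.2.isEmpty then st.1 else st.1 ++ [st.2]

-- ===== PORT B =====
-- the comprehension filter: i == 0 or abs(ordenados[i]["bbox"][1] - ordenados[i-1]["bbox"][1]) >= umbral_vertical
def pvPredB (u : Int) (ordenados : List (List (String × List Int))) (i : Int) : Bool :=
  i == 0 || decide (u ≤ |pvY ((PySem.List.pyGet? ordenados i).getD []) - pvY ((PySem.List.pyGet? ordenados (i - 1)).getD [])|)

def agrupar_checkboxes_ordenados_alt (checkboxes : List (List (String × List Int))) (umbral_vertical : Int) : List (List (List (String × List Int))) :=
  let ordenados := PySem.List.sorted2 checkboxes (fun cb => pvY cb) (fun cb => pvX cb)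
  let n : Int := (ordenados.length : Int)
  let limites := (PySem.List.pyRange 0 n 1).filter (pvPredB umbral_vertical ordenados)
  (limites.zip (PySem.List.slice limites (some 1) none ++ [n])).map
    (fun ab => PySem.List.slice ordenados (some ab.1) (some ab.2))

-- ===== PRECONDITION & SPEC =====
-- Pre_ excludes exactly the inputs where Python raises: some checkbox lacks a "bbox" key
-- (KeyError) or its "bbox" list has fewer than 2 entries (IndexError in the sort key).
def Pre_agrupar_checkboxes_ordenados (checkboxes : List (List (String × List Int))) (umbral_vertical : Int) : Prop :=
  ∀ cb ∈ checkboxes, (PySem.Dict.get? (PySem.Dict.mk cb) "bbox").isSome = true ∧ 2 ≤ ((PySem.Dict.get? (PySem.Dict.mk cb) "bbox").getD []).length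
instance (checkboxes : List (List (String × List Int))) (umbral_vertical : Int) : Decidable (Pre_agrupar_checkboxes_ordenados checkboxes umbral_vertical) := by unfold Pre_agrupar_checkboxes_ordenados; infer_instance

def pvWitness_agrupar_checkboxes_ordenados : (List (List (String × List Int))) × Int :=
  ([[("bbox", [0, 0, 10, 10])], [("bbox", [0, 100, 10, 10])]], 50)

def Spec_agrupar_checkboxes_ordenados (checkboxes : List (List (String × List Int))) (umbral_vertical : Int) (out : List (List (List (String × List Int)))) : Prop := out = agrupar_checkboxes_ordenados_alt checkboxes umbral_vertical
instance (checkboxes : List (List (String × List Int))) (umbral_vertical : Int) (out : List (List (List (String × List Int)))) : Decidable (Spec_agrupar_checkboxes_ordenados checkboxes umbral_vertical out) := by unfold Spec_agrupar_checkboxes_ordenados; infer_instance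

-- ===== CLAIM (what is proved, stated in full; the proofs are below) =====
def Claim_equal_agrupar_checkboxes_ordenados : Prop := ∀ (checkboxes : List (List (String × List Int))) (umbral_vertical : Int), Dom_agrupar_checkboxes_ordenados checkboxes umbral_vertical → Pre_agrupar_checkboxes_ordenados checkboxes umbral_vertical → Spec_agrupar_checkboxes_ordenados checkboxes umbral_vertical (agrupar_checkboxes_ordenados checkboxes umbral_vertical)

-- ===== LEMMAS AND PROOFS =====

-- canonical grouping: pvGrp1 u x L = (group beginning with x, remaining groups)
def pvGrp1 (u : Int) (x : List (String × List Int)) :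
    List (List (String × List Int)) →
    List (List (String × List Int)) × List (List (List (String × List Int)))
  | [] => ([x], [])
  | y :: ys =>
    let r := pvGrp1 u y ys
    if |pvY y - pvY x| < u then (x :: r.1, r.2) else ([x], r.1 :: r.2)

-- the flush after A's loop, as a named function (for rewriting)
def pvFinishA (st : List (List (List (String × List Int))) × List (List (String × List Int))) :
    List (List (List (String × List Int))) :=
  if st.2.isEmpty then st.1 else st.1 ++ [st.2]

theorem pvAfold (u : Int) :
    ∀ (L : List (List (String × List Int)))
      (acc : List (List (List (String × List Int))))
      (cur : List (List (String × List Int))) (x : List (String × List Int)),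
    pvFinishA (L.foldl (pvStepA u) (acc, cur ++ [x]))
    = acc ++ ((cur ++ (pvGrp1 u x L).1) :: (pvGrp1 u x L).2) := by
  intro L
  induction L with
  | nil =>
    intro acc cur x
    simp [pvFinishA, pvGrp1]
  | cons y ys ih =>
    intro acc cur x
    have hstep : pvStepA u (acc, cur ++ [x]) y =
        if |pvY y - pvY x| < u then (acc, (cur ++ [x]) ++ [y]) else (acc ++ [cur ++ [x]], [y]) := by
      simp [pvStepA, PySem.List.pyGet?_neg_one_append_singleton]
    rw [List.foldl_cons, hstep]
    by_cases h : |pvY y - pvY x| < u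
    · rw [if_pos h, ih acc (cur ++ [x]) y]
      simp [pvGrp1, h]
    · rw [if_neg h]
      have := ih (acc ++ [cur ++ [x]]) [] y
      simp only [List.nil_append] at this
      rw [this]
      simp [pvGrp1, h]

-- B's first pass, recursively: boundary indices of xs after pending element x, starting index s
def pvBnds (u : Int) : List (List (String × List Int)) → List (String × List Int) → Nat → List Nat
  | [], _, _ => []
  | y :: ys, x, s => if u ≤ |pvY y - pvY x| then s :: pvBnds u ys y (s + 1) else pvBnds u ys y (s + 1)

theorem pvBnds_ge (u : Int) :
    ∀ (ys : List (List (String × List Int))) (y : List (String × List Int)) (s m : Nat),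
    m ∈ pvBnds u ys y s → s ≤ m := by
  intro ys
  induction ys with
  | nil => intro y s m h; simp [pvBnds] at h
  | cons z zs ih =>
    intro y s m h
    dsimp [pvBnds] at h
    split at h
    · rcases List.mem_cons.mp h with h | h
      · omega
      · have := ih z (s + 1) m h; omega
    · have := ih z (s + 1) m h; omega

-- the filter of B's comprehension equals pvBnds
theorem pvKey (u : Int) (L : List (List (String × List Int))) :
    ∀ (xs : List (List (String × List Int))) (x : List (String × List Int)) (k : Nat),
    L.drop k = x :: xs →
    (PySem.List.pyRange ((k : Int) + 1) (L.length : Int) 1).filter (pvPredB u L)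
    = (pvBnds u xs x (k + 1)).map (fun j : Nat => (j : Int)) := by
  intro xs
  induction xs with
  | nil =>
    intro x k h
    have hlen : L.length = k + 1 := by
      have := List.length_drop (l := L) (i := k)
      rw [h] at this
      simp at this
      omega
    rw [hlen]
    rw [PySem.List.pyRange_one_eq_nil (by push_cast; omega)]
    simp [pvBnds]
  | cons y ys ih =>
    intro x k h
    have hlen : k + 2 ≤ L.length := by
      have := List.length_drop (l := L) (i := k)
      rw [h] at this
      simp at this
      omega
    have hx : L[k]? = some x := by
      have h0 : (L.drop k)[0]? = some x := by rw [h]; rfl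
      simpa [List.getElem?_drop] using h0
    have hy : L[k + 1]? = some y := by
      have h0 : (L.drop k)[1]? = some y := by rw [h]; rfl
      simpa [List.getElem?_drop] using h0
    have hdrop : L.drop (k + 1) = y :: ys := by
      have : L.drop (k + 1) = (L.drop k).drop 1 := by
        rw [List.drop_drop]
      rw [this, h]
      simp
    rw [PySem.List.pyRange_one_cons (by omega)]
    rw [List.filter_cons]
    have hpred : pvPredB u L ((k : Int) + 1) = decide (u ≤ |pvY y - pvY x|) := by
      have h1 : PySem.List.pyGet? L ((k : Int) + 1) = some y := by
        have he : ((k : Int) + 1) = ((k + 1 : Nat) : Int) := by omega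
        rw [he, PySem.List.pyGet?_natCast, hy]
      have h2 : PySem.List.pyGet? L ((k : Int) + 1 - 1) = some x := by
        have he : ((k : Int) + 1 - 1) = ((k : Nat) : Int) := by omega
        rw [he, PySem.List.pyGet?_natCast, hx]
      have hz : (((k : Int) + 1) == 0) = false := by
        simp only [beq_eq_false_iff_ne, ne_eq]
        omega
      simp only [pvPredB, hz, Bool.false_or, h1, h2, Option.getD_some]
    rw [hpred]
    have hih := ih y (k + 1) hdrop
    have harith : ((k : Int) + 1) + 1 = ((k + 1 : Nat) : Int) + 1 := by omega
    dsimp [pvBnds]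
    by_cases hb : u ≤ |pvY y - pvY x|
    · rw [if_pos (by simpa using hb), if_pos hb]
      rw [harith, hih]
      simp
    · rw [if_neg (by simpa using hb), if_neg hb]
      rw [harith, hih]

-- slicing off the first element of a slice
theorem pvSliceStep (L : List (List (String × List Int))) (k m : Nat)
    (x : List (String × List Int)) (xs : List (List (String × List Int)))
    (h : L.drop k = x :: xs) (hm : k < m) :
    PySem.List.slice L (some (k : Int)) (some (m : Int))
    = x :: PySem.List.slice L (some ((k + 1 : Nat) : Int)) (some (m : Int)) := by
  rw [PySem.List.slice_natCast, PySem.List.slice_natCast]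
  have hdrop : L.drop (k + 1) = xs := by
    have : L.drop (k + 1) = (L.drop k).drop 1 := by rw [List.drop_drop]
    rw [this, h]; simp
  rw [h, hdrop]
  have : m - k = (m - (k + 1)) + 1 := by omega
  rw [this]
  simp

-- the zip-and-slice pass over the boundaries rebuilds the canonical groups
theorem pvSliceZip (u : Int) (L : List (List (String × List Int))) :
    ∀ (xs : List (List (String × List Int))) (x : List (String × List Int)) (k : Nat),
    L.drop k = x :: xs →
    ((((k : Nat) : Int) :: (pvBnds u xs x (k + 1)).map (fun j : Nat => (j : Int))).zip
       ((pvBnds u xs x (k + 1)).map (fun j : Nat => (j : Int)) ++ [(L.length : Int)])).map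
      (fun ab => PySem.List.slice L (some ab.1) (some ab.2))
    = (pvGrp1 u x xs).1 :: (pvGrp1 u x xs).2 := by
  intro xs
  induction xs with
  | nil =>
    intro x k h
    have hlen : L.length = k + 1 := by
      have := List.length_drop (l := L) (i := k)
      rw [h] at this
      simp at this
      omega
    simp only [pvBnds, pvGrp1, List.map_nil, List.nil_append, List.zip_cons_cons,
      List.zip_nil_right, List.map_cons]
    rw [hlen]
    rw [PySem.List.slice_natCast]
    rw [h]
    have : k + 1 - k = 1 := by omega
    rw [this]
    simp
  | cons y ys ih =>
    intro x k h
    have hdrop : L.drop (k + 1) = y :: ys := by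
      have : L.drop (k + 1) = (L.drop k).drop 1 := by rw [List.drop_drop]
      rw [this, h]; simp
    have hlen : k + 2 ≤ L.length := by
      have := List.length_drop (l := L) (i := k)
      rw [h] at this
      simp at this
      omega
    have hih := ih y (k + 1) hdrop
    dsimp [pvBnds, pvGrp1]
    by_cases hb : u ≤ |pvY y - pvY x|
    · rw [if_pos hb, if_neg (by omega)]
      simp only [List.map_cons, List.cons_append, List.zip_cons_cons, List.map_cons]
      rw [pvSliceStep L k (k + 1) x (y :: ys) h (by omega)]
      have hsl : PySem.List.slice L (some ((k + 1 : Nat) : Int)) (some ((k + 1 : Nat) : Int)) = [] := by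
        rw [PySem.List.slice_natCast]; simp
      rw [hsl]
      rw [hih]
    · rw [if_neg hb, if_pos (by omega)]
      -- boundaries unchanged; first slice starts at k instead of k+1
      cases hbn : pvBnds u ys y (k + 1 + 1) with
      | nil =>
        rw [hbn] at hih
        simp only [List.map_nil, List.nil_append, List.zip_cons_cons, List.zip_nil_right,
          List.map_cons] at hih ⊢
        obtain ⟨h1, h2⟩ := List.cons_eq_cons.mp hih
        rw [pvSliceStep L k L.length x (y :: ys) h (by omega)]
        push_cast at h1
        simp [h1, ← h2]
      | cons m ms =>
        rw [hbn] at hih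
        have hkm : k + 1 + 1 ≤ m :=
          pvBnds_ge u ys y (k + 1 + 1) m (by rw [hbn]; exact List.mem_cons_self)
        simp only [List.map_cons, List.cons_append, List.zip_cons_cons] at hih ⊢
        obtain ⟨h1, h2⟩ := List.cons_eq_cons.mp hih
        rw [pvSliceStep L k m x (y :: ys) h (by omega)]
        push_cast at h1
        simp [h1, h2]

-- ===== VERDICT (by name: the statement is the Claim_ definition above) =====
theorem agrupar_checkboxes_ordenados_spec : Claim_equal_agrupar_checkboxes_ordenados := by
  intro checkboxes umbral_vertical _ _
  unfold Spec_agrupar_checkboxes_ordenados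
  unfold agrupar_checkboxes_ordenados agrupar_checkboxes_ordenados_alt
  dsimp only
  cases h : PySem.List.sorted2 checkboxes (fun cb => pvY cb) (fun cb => pvX cb) with
  | nil => rfl
  | cons x xs =>
    have h1 : (x :: xs).foldl (pvStepA umbral_vertical) ([], []) =
        xs.foldl (pvStepA umbral_vertical) ([], [] ++ [x]) := by
      simp [pvStepA]
    rw [h1]
    simp only [List.nil_append]
    have hA := pvAfold umbral_vertical xs [] [] x
    simp only [pvFinishA, List.nil_append] at hA
    rw [hA]
    -- B side
    have hd0 : (x :: xs).drop 0 = x :: xs := by simp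
    have hfilter : (PySem.List.pyRange 0 ((x :: xs).length : Int) 1).filter (pvPredB umbral_vertical (x :: xs))
        = 0 :: (pvBnds umbral_vertical xs x 1).map (fun j : Nat => (j : Int)) := by
      rw [PySem.List.pyRange_one_cons (by simp)]
      rw [List.filter_cons]
      rw [if_pos (by simp [pvPredB])]
      norm_num
      have := pvKey umbral_vertical (x :: xs) xs x 0 hd0
      simp only [Nat.cast_zero, zero_add, List.length_cons, Nat.cast_add, Nat.cast_one] at this
      rw [this]
    rw [hfilter]
    rw [PySem.List.slice_from_one]
    simp only [List.tail_cons]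
    have := pvSliceZip umbral_vertical (x :: xs) xs x 0 hd0
    simp only [Nat.cast_zero, zero_add] at this
    rw [this]
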